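-- pv_equiv track=rewrite | github.com/Kgray44/Stormhelm | src/stormhelm/core/orchestrator/planner_v2.py | _context_reference_from_text
-- ===== SOURCE A (Python) =====
-- def _context_reference_from_text(text: str) -> str:
--     for term in ("selected", "highlighted", "this", "that", "it", "there"):
--         if term in text.split():
--             return term
--     if "current" in text.split():
--         return "current"
--     if any(term in text.split() for term in {"previous", "last", "same"}):
--         return "previous_result"
--     return "none"
-- ===== SOURCE B (Python) =====
-- _TABLE = {
--     "selected": (0, "selected"),
--     "highlighted": (1, "highlighted"),
--     "this": (2, "this"),
--     "that": (3, "that"),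
--     "it": (4, "it"),
--     "there": (5, "there"),
--     "current": (6, "current"),
--     "previous": (7, "previous_result"),
--     "last": (7, "previous_result"),
--     "same": (7, "previous_result"),
-- }
--
-- def _context_reference_from_text(text: str) -> str:
--     best = None
--     for word in text.split():
--         entry = _TABLE.get(word)
--         if entry is not None and (best is None or entry[0] < best[0]):
--             best = entry
--     return best[1] if best is not None else "none"
-- ===== Notes on version B (the rewrite author's own statement) =====
-- stated objective: simpler
-- what changed: Replaced the sequence of per-keyword membership tests against text.split() by a single (rank, label) table and one pass over the words keeping the minimum-rank keyword entry.
import Mathlib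
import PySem

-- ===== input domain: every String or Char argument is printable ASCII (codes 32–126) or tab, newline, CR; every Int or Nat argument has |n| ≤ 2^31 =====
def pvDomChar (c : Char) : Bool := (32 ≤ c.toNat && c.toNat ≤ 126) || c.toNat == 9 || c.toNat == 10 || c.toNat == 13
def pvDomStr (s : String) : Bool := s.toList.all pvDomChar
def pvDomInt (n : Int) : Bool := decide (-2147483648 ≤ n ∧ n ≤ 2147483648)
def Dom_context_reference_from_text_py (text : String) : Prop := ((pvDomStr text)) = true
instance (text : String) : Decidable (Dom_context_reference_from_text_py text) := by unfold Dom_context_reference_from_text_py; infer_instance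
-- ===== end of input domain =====

-- B replaces A's sequence of per-keyword membership tests by one (rank, label) table and a
-- single pass over the words keeping the minimum-rank entry (objective: simpler).

-- ===== PORT A =====
-- the 'for term in (...): if term in text.split(): return term' loop
def pvALoop (ws : List String) : List String → Option String
  | [] => none
  | term :: rest => if ws.contains term then some term else pvALoop ws rest

def context_reference_from_text_py (text : String) : String :=
  match pvALoop (PySem.Str.split₀ text) ["selected", "highlighted", "this", "that", "it", "there"] with
  | some term => term
  | none =>
    if (PySem.Str.split₀ text).contains "current" then "current"
    else if (PySem.Set.ofList ["previous", "last", "same"]).any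
        (fun term => (PySem.Str.split₀ text).contains term) then "previous_result"
    else "none"

-- ===== PORT B =====
def pvTable : PySem.Dict String (Int × String) := PySem.Dict.mk
  [("selected", (0, "selected")), ("highlighted", (1, "highlighted")), ("this", (2, "this")),
   ("that", (3, "that")), ("it", (4, "it")), ("there", (5, "there")), ("current", (6, "current")),
   ("previous", (7, "previous_result")), ("last", (7, "previous_result")), ("same", (7, "previous_result"))]

-- the loop body of Source B
def pvStep (best : Option (Int × String)) (word : String) : Option (Int × String) :=
  match pvTable.get? word with
  | none => best
  | some entry =>
    match best with
    | none => some entry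
    | some b => if entry.1 < b.1 then some entry else best

def context_reference_from_text_py_alt (text : String) : String :=
  match (PySem.Str.split₀ text).foldl pvStep none with
  | some b => b.2
  | none => "none"

-- ===== PRECONDITION & SPEC =====
def Spec_context_reference_from_text_py (text : String) (out : String) : Prop := out = context_reference_from_text_py_alt text
instance (text : String) (out : String) : Decidable (Spec_context_reference_from_text_py text out) := by unfold Spec_context_reference_from_text_py; infer_instance

-- ===== CLAIM (what is proved, stated in full; the proofs are below) =====
def Claim_equal_context_reference_from_text_py : Prop := ∀ (text : String), Dom_context_reference_from_text_py text → Spec_context_reference_from_text_py text (context_reference_from_text_py text)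

-- ===== LEMMAS AND PROOFS =====

def pvRankOf (w : String) : Int := ((pvTable.get? w).map Prod.fst).getD 8

def pvLabelOf (r : Int) : String :=
  if r = 0 then "selected" else if r = 1 then "highlighted" else if r = 2 then "this"
  else if r = 3 then "that" else if r = 4 then "it" else if r = 5 then "there"
  else if r = 6 then "current" else if r = 7 then "previous_result" else "none"

def pvStateOf (r : Int) : Option (Int × String) :=
  if r < 8 then some (r, pvLabelOf r) else none

def pvMinR (ws : List String) (m : Int) : Int :=
  ws.foldl (fun a w => min a (pvRankOf w)) m

lemma pvTable_get?_none (w : String)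
    (h0 : ¬ w = "selected") (h1 : ¬ w = "highlighted") (h2 : ¬ w = "this") (h3 : ¬ w = "that")
    (h4 : ¬ w = "it") (h5 : ¬ w = "there") (h6 : ¬ w = "current") (h7 : ¬ w = "previous")
    (h8 : ¬ w = "last") (h9 : ¬ w = "same") : pvTable.get? w = none := by
  simp [pvTable, PySem.Dict.get?, Ne.symm h0, Ne.symm h1, Ne.symm h2,
    Ne.symm h3, Ne.symm h4, Ne.symm h5, Ne.symm h6, Ne.symm h7, Ne.symm h8, Ne.symm h9]

lemma pv_rank_cases (w : String) :
    (pvTable.get? w = none ∧ pvRankOf w = 8) ∨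
    ((w = "selected" ∨ w = "highlighted" ∨ w = "this" ∨ w = "that" ∨ w = "it" ∨ w = "there" ∨
      w = "current" ∨ w = "previous" ∨ w = "last" ∨ w = "same") ∧
     pvTable.get? w = some (pvRankOf w, pvLabelOf (pvRankOf w)) ∧ 0 ≤ pvRankOf w ∧ pvRankOf w ≤ 7) := by
  by_cases h0 : w = "selected"; · subst h0; exact Or.inr ⟨by tauto, by decide, by decide, by decide⟩
  by_cases h1 : w = "highlighted"; · subst h1; exact Or.inr ⟨by tauto, by decide, by decide, by decide⟩
  by_cases h2 : w = "this"; · subst h2; exact Or.inr ⟨by tauto, by decide, by decide, by decide⟩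
  by_cases h3 : w = "that"; · subst h3; exact Or.inr ⟨by tauto, by decide, by decide, by decide⟩
  by_cases h4 : w = "it"; · subst h4; exact Or.inr ⟨by tauto, by decide, by decide, by decide⟩
  by_cases h5 : w = "there"; · subst h5; exact Or.inr ⟨by tauto, by decide, by decide, by decide⟩
  by_cases h6 : w = "current"; · subst h6; exact Or.inr ⟨by tauto, by decide, by decide, by decide⟩
  by_cases h7 : w = "previous"; · subst h7; exact Or.inr ⟨by tauto, by decide, by decide, by decide⟩
  by_cases h8 : w = "last"; · subst h8; exact Or.inr ⟨by tauto, by decide, by decide, by decide⟩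
  by_cases h9 : w = "same"; · subst h9; exact Or.inr ⟨by tauto, by decide, by decide, by decide⟩
  have h := pvTable_get?_none w h0 h1 h2 h3 h4 h5 h6 h7 h8 h9
  exact Or.inl ⟨h, by simp [pvRankOf, h]⟩

lemma pv_rank_le (w : String) : pvRankOf w ≤ 8 := by
  rcases pv_rank_cases w with ⟨_, h⟩ | ⟨_, _, _, h⟩ <;> omega

lemma pv_rank_nonneg (w : String) : 0 ≤ pvRankOf w := by
  rcases pv_rank_cases w with ⟨_, h⟩ | ⟨_, _, h, _⟩ <;> omega

lemma pv_step_state (r : Int) (hr : r ≤ 8) (w : String) :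
    pvStep (pvStateOf r) w = pvStateOf (min r (pvRankOf w)) := by
  rcases pv_rank_cases w with ⟨h1, h2⟩ | ⟨_, hg, h0, h7⟩
  · simp only [pvStep, h1]
    rw [h2, min_eq_left hr]
  · simp only [pvStep, hg]
    unfold pvStateOf
    by_cases hlt : r < 8
    · rw [if_pos hlt]
      dsimp only
      by_cases hk : pvRankOf w < r
      · rw [if_pos hk, min_eq_right (le_of_lt hk), if_pos (by omega : pvRankOf w < 8)]
      · rw [if_neg hk, min_eq_left (by omega : r ≤ pvRankOf w), if_pos hlt]
    · rw [if_neg hlt]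
      dsimp only
      rw [min_eq_right (by omega : pvRankOf w ≤ r), if_pos (by omega : pvRankOf w < 8)]

lemma pv_fold_state (ws : List String) : ∀ r : Int, r ≤ 8 →
    ws.foldl pvStep (pvStateOf r) = pvStateOf (pvMinR ws r) := by
  induction ws with
  | nil => intro r _; rfl
  | cons w ws ih =>
    intro r hr
    have e : pvMinR (w :: ws) r = pvMinR ws (min r (pvRankOf w)) := rfl
    rw [e, List.foldl_cons, pv_step_state r hr w, ih _ (by have := pv_rank_le w; omega)]

lemma pv_alt_eq (text : String) :
    context_reference_from_text_py_alt text = pvLabelOf (pvMinR (PySem.Str.split₀ text) 8) := by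
  unfold context_reference_from_text_py_alt
  have h8 : (none : Option (Int × String)) = pvStateOf 8 := by rfl
  rw [h8, pv_fold_state _ 8 le_rfl]
  unfold pvStateOf
  by_cases h : pvMinR (PySem.Str.split₀ text) 8 < 8
  · rw [if_pos h]
  · rw [if_neg h]
    unfold pvLabelOf
    split_ifs <;> first | rfl | omega

lemma pv_minR_le_init (ws : List String) : ∀ m : Int, pvMinR ws m ≤ m := by
  induction ws with
  | nil => intro m; exact le_rfl
  | cons w ws ih =>
    intro m
    calc pvMinR ws (min m (pvRankOf w)) ≤ min m (pvRankOf w) := ih _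
    _ ≤ m := min_le_left _ _

lemma pv_minR_le_of_mem (ws : List String) (w : String) (hw : w ∈ ws) :
    ∀ m : Int, pvMinR ws m ≤ pvRankOf w := by
  induction ws with
  | nil => cases hw
  | cons v ws ih =>
    intro m
    have e : pvMinR (v :: ws) m = pvMinR ws (min m (pvRankOf v)) := rfl
    rw [e]
    rcases List.mem_cons.mp hw with h | h
    · subst h
      calc pvMinR ws (min m (pvRankOf w)) ≤ min m (pvRankOf w) := pv_minR_le_init ws _
      _ ≤ pvRankOf w := min_le_right _ _
    · exact ih h _

lemma pv_minR_mem_or (ws : List String) : ∀ m : Int,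
    pvMinR ws m = m ∨ ∃ w ∈ ws, pvRankOf w = pvMinR ws m := by
  induction ws with
  | nil => intro m; exact Or.inl rfl
  | cons v ws ih =>
    intro m
    rcases ih (min m (pvRankOf v)) with h | ⟨w, hw, hr⟩
    · have hm : pvMinR (v :: ws) m = min m (pvRankOf v) := h
      rcases min_cases m (pvRankOf v) with ⟨he, _⟩ | ⟨he, _⟩
      · exact Or.inl (by rw [hm, he])
      · exact Or.inr ⟨v, List.mem_cons_self, by rw [hm, he]⟩
    · exact Or.inr ⟨w, List.mem_cons_of_mem _ hw, hr⟩

lemma pv_minR_eq (ws : List String) (k : Int) (t : String) (ht : t ∈ ws)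
    (hrt : pvRankOf t = k) (hlow : ∀ w ∈ ws, ¬ pvRankOf w < k) : pvMinR ws 8 = k := by
  have h1 : pvMinR ws 8 ≤ k := hrt ▸ pv_minR_le_of_mem ws t ht 8
  rcases pv_minR_mem_or ws 8 with h | ⟨w, hw, hr⟩
  · have := pv_rank_le t; omega
  · have := hlow w hw; omega

-- ===== VERDICT (by name: the statement is the Claim_ definition above) =====
theorem context_reference_from_text_py_spec : Claim_equal_context_reference_from_text_py := by
  intro text _
  unfold Spec_context_reference_from_text_py
  rw [pv_alt_eq]
  unfold context_reference_from_text_py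
  generalize PySem.Str.split₀ text = ws
  by_cases m0 : "selected" ∈ ws
  · rw [pv_minR_eq ws 0 "selected" m0 (by decide) ?_]
    · simp [pvALoop, m0, pvLabelOf]
    · intro w hw
      have := pv_rank_nonneg w; omega
  by_cases m1 : "highlighted" ∈ ws
  · rw [pv_minR_eq ws 1 "highlighted" m1 (by decide) ?_]
    · simp [pvALoop, m0, m1, pvLabelOf]
    · intro w hw
      rcases pv_rank_cases w with ⟨_, h⟩ | ⟨hd, _, _, _⟩
      · omega
      · rcases hd with e|e|e|e|e|e|e|e|e|e <;> subst e <;>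
          first | exact absurd hw m0 | decide
  by_cases m2 : "this" ∈ ws
  · rw [pv_minR_eq ws 2 "this" m2 (by decide) ?_]
    · simp [pvALoop, m0, m1, m2, pvLabelOf]
    · intro w hw
      rcases pv_rank_cases w with ⟨_, h⟩ | ⟨hd, _, _, _⟩
      · omega
      · rcases hd with e|e|e|e|e|e|e|e|e|e <;> subst e <;>
          first | exact absurd hw m0 | exact absurd hw m1 | decide
  by_cases m3 : "that" ∈ ws
  · rw [pv_minR_eq ws 3 "that" m3 (by decide) ?_]
    · simp [pvALoop, m0, m1, m2, m3, pvLabelOf]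
    · intro w hw
      rcases pv_rank_cases w with ⟨_, h⟩ | ⟨hd, _, _, _⟩
      · omega
      · rcases hd with e|e|e|e|e|e|e|e|e|e <;> subst e <;>
          first | exact absurd hw m0 | exact absurd hw m1 | exact absurd hw m2 | decide
  by_cases m4 : "it" ∈ ws
  · rw [pv_minR_eq ws 4 "it" m4 (by decide) ?_]
    · simp [pvALoop, m0, m1, m2, m3, m4, pvLabelOf]
    · intro w hw
      rcases pv_rank_cases w with ⟨_, h⟩ | ⟨hd, _, _, _⟩
      · omega
      · rcases hd with e|e|e|e|e|e|e|e|e|e <;> subst e <;>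
          first | exact absurd hw m0 | exact absurd hw m1 | exact absurd hw m2 | exact absurd hw m3 | decide
  by_cases m5 : "there" ∈ ws
  · rw [pv_minR_eq ws 5 "there" m5 (by decide) ?_]
    · simp [pvALoop, m0, m1, m2, m3, m4, m5, pvLabelOf]
    · intro w hw
      rcases pv_rank_cases w with ⟨_, h⟩ | ⟨hd, _, _, _⟩
      · omega
      · rcases hd with e|e|e|e|e|e|e|e|e|e <;> subst e <;>
          first | exact absurd hw m0 | exact absurd hw m1 | exact absurd hw m2 | exact absurd hw m3 | exact absurd hw m4 | decide
  by_cases m6 : "current" ∈ ws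
  · rw [pv_minR_eq ws 6 "current" m6 (by decide) ?_]
    · simp [pvALoop, m0, m1, m2, m3, m4, m5, m6, pvLabelOf]
    · intro w hw
      rcases pv_rank_cases w with ⟨_, h⟩ | ⟨hd, _, _, _⟩
      · omega
      · rcases hd with e|e|e|e|e|e|e|e|e|e <;> subst e <;>
          first | exact absurd hw m0 | exact absurd hw m1 | exact absurd hw m2 | exact absurd hw m3 | exact absurd hw m4 | exact absurd hw m5 | decide
  by_cases m7 : "previous" ∈ ws
  · rw [pv_minR_eq ws 7 "previous" m7 (by decide) ?_]
    · simp [pvALoop, m0, m1, m2, m3, m4, m5, m6, m7, pvLabelOf]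
    · intro w hw
      rcases pv_rank_cases w with ⟨_, h⟩ | ⟨hd, _, _, _⟩
      · omega
      · rcases hd with e|e|e|e|e|e|e|e|e|e <;> subst e <;>
          first | exact absurd hw m0 | exact absurd hw m1 | exact absurd hw m2 | exact absurd hw m3 | exact absurd hw m4 | exact absurd hw m5 | exact absurd hw m6 | decide
  by_cases m8 : "last" ∈ ws
  · rw [pv_minR_eq ws 7 "last" m8 (by decide) ?_]
    · simp [pvALoop, m0, m1, m2, m3, m4, m5, m6, m7, m8, pvLabelOf]
    · intro w hw
      rcases pv_rank_cases w with ⟨_, h⟩ | ⟨hd, _, _, _⟩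
      · omega
      · rcases hd with e|e|e|e|e|e|e|e|e|e <;> subst e <;>
          first | exact absurd hw m0 | exact absurd hw m1 | exact absurd hw m2 | exact absurd hw m3 | exact absurd hw m4 | exact absurd hw m5 | exact absurd hw m6 | decide
  by_cases m9 : "same" ∈ ws
  · rw [pv_minR_eq ws 7 "same" m9 (by decide) ?_]
    · simp [pvALoop, m0, m1, m2, m3, m4, m5, m6, m7, m8, m9, pvLabelOf]
    · intro w hw
      rcases pv_rank_cases w with ⟨_, h⟩ | ⟨hd, _, _, _⟩
      · omega
      · rcases hd with e|e|e|e|e|e|e|e|e|e <;> subst e <;>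
          first | exact absurd hw m0 | exact absurd hw m1 | exact absurd hw m2 | exact absurd hw m3 | exact absurd hw m4 | exact absurd hw m5 | exact absurd hw m6 | decide
  have hk : pvMinR ws 8 = 8 := by
    rcases pv_minR_mem_or ws 8 with h | ⟨w, hw, hr⟩
    · exact h
    · rcases pv_rank_cases w with ⟨_, h8⟩ | ⟨hd, _, _, _⟩
      · have h1 := pv_minR_le_init ws 8; omega
      · rcases hd with e|e|e|e|e|e|e|e|e|e <;> subst e <;>
          first | exact absurd hw m0 | exact absurd hw m1 | exact absurd hw m2 | exact absurd hw m3 | exact absurd hw m4 | exact absurd hw m5 | exact absurd hw m6 | exact absurd hw m7 | exact absurd hw m8 | exact absurd hw m9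
  rw [hk]
  simp [pvALoop, m0, m1, m2, m3, m4, m5, m6, m7, m8, m9, pvLabelOf]
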